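-- pv_equiv track=rewrite | github.com/koreakk/Online-Judge | boj/Bronze I/2775. 부녀회장이 될테야/Python.py | solution
-- ===== SOURCE A (Python) =====
-- def solution(k: int, n: int) -> int:
--     dp = [[0] * (n + 1) for _ in range(k + 1)]
--
--     def F(k: int, n: int) -> int:
--         if k == 0 or n == 1:
--             return n
--
--         if not dp[k][n]:
--             dp[k][n] = F(k - 1, n) + F(k, n - 1)
--
--         return dp[k][n]
--
--     return F(k, n)
-- ===== SOURCE B (Python) =====
-- def solution(k: int, n: int) -> int:
--     # closed form: occupants = C(n+k, k+1), computed as an exact rising-product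
--     c = 1
--     for i in range(1, k + 2):
--         c = c * (n + i - 1) // i
--     return c
-- ===== Notes on version B (the rewrite author's own statement) =====
-- stated objective: faster
-- what changed: Replaced the memoized O(k*n) Pascal-style recursion (with a (k+1)x(n+1) dp table) by the closed form C(n+k, k+1) computed as an exact O(k) rising-factorial product loop.
import Mathlib
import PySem

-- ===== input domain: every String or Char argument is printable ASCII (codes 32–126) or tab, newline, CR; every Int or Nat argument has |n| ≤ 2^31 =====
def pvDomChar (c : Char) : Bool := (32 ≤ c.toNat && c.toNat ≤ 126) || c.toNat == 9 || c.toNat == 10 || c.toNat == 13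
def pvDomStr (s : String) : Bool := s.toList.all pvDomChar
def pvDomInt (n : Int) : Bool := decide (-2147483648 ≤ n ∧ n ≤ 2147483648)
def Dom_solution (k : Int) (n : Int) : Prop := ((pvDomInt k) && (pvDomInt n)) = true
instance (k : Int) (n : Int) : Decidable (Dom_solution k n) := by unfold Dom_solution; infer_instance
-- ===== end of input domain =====

-- B replaces A's memoized O(k*n) recursion by the closed form C(n+k, k+1), computed as an exact O(k) product loop (objective: faster).

-- ===== PORT A =====
-- A's inner helper F: memoized recursion with the dp table threaded through.
-- fuel bounds the recursion depth (each recursive call decreases k+n by 1, so the fuel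
-- supplied by `solution` is enough on every input Pre_ admits; the fuel-0 branch is
-- never reached there). dp[k][n] reads/writes are PySem.List.pyGetD / pySetD, exact on
-- Pre_ where the indices are in range (out of range Python raises, excluded by Pre_).
def pvF : Nat → Int → Int → List (List Int) → Int × List (List Int)
  | 0, _, n, dp => (n, dp)
  | fuel+1, k, n, dp =>
    if k == 0 || n == 1 then (n, dp)
    else if PySem.List.pyGetD (PySem.List.pyGetD dp k []) n 0 == 0 then
      let r1 := pvF fuel (k - 1) n dp
      let r2 := pvF fuel k (n - 1) r1.2
      let dp' := PySem.List.pySetD r2.2 k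
        (PySem.List.pySetD (PySem.List.pyGetD r2.2 k []) n (r1.1 + r2.1))
      (PySem.List.pyGetD (PySem.List.pyGetD dp' k []) n 0, dp')
    else (PySem.List.pyGetD (PySem.List.pyGetD dp k []) n 0, dp)

def solution (k : Int) (n : Int) : Int :=
  (pvF ((k + n).toNat + 1) k n
    (List.replicate (k + 1).toNat (List.replicate (n + 1).toNat (0 : Int)))).1

-- ===== PORT B =====
def solution_alt (k : Int) (n : Int) : Int :=
  (PySem.List.pyRange 1 (k + 2)).foldl (fun c i => PySem.Int.floordiv (c * (n + i - 1)) i) 1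

-- ===== PRECONDITION & SPEC =====
-- Exactly the inputs on which A returns: everywhere else (k < 0 with n ≠ 1, or n < 1
-- with k ≠ 0) A raises IndexError indexing its dp table.
def Pre_solution (k : Int) (n : Int) : Prop := (0 ≤ k ∧ 1 ≤ n) ∨ k = 0 ∨ n = 1
instance (k : Int) (n : Int) : Decidable (Pre_solution k n) := by unfold Pre_solution; infer_instance
def pvWitness_solution : Int × Int := (3, 4)

def Spec_solution (k : Int) (n : Int) (out : Int) : Prop := out = solution_alt k n
instance (k : Int) (n : Int) (out : Int) : Decidable (Spec_solution k n out) := by unfold Spec_solution; infer_instance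

-- ===== CLAIM (what is proved, stated in full; the proofs are below) =====
def Claim_equal_solution : Prop := ∀ (k : Int) (n : Int), Dom_solution k n → Pre_solution k n → Spec_solution k n (solution k n)

-- ===== LEMMAS AND PROOFS =====

-- The mathematical recurrence A computes (for n ≥ 1 it is Python's F).
def pvf (k n : Nat) : Int :=
  if k = 0 ∨ n ≤ 1 then (n : Int) else pvf (k - 1) n + pvf k (n - 1)
termination_by k + n
decreasing_by all_goals omega

theorem pvf_choose : ∀ m k n : Nat, k + n ≤ m → 1 ≤ n → pvf k n = ((n + k).choose (k + 1) : Int) := by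
  intro m
  induction m with
  | zero => intro k n h hn; omega
  | succ m ih =>
    intro k n h hn
    rw [pvf]
    by_cases hb : k = 0 ∨ n ≤ 1
    · rw [if_pos hb]
      rcases hb with hk | hn1
      · subst hk; simp
      · have : n = 1 := by omega
        subst this; simp [Nat.add_comm 1 k]
    · rw [if_neg hb]
      push_neg at hb
      obtain ⟨kk, rfl⟩ : ∃ kk, k = kk + 1 := ⟨k - 1, by omega⟩
      obtain ⟨nn, rfl⟩ : ∃ nn, n = nn + 2 := ⟨n - 2, by omega⟩
      rw [show kk + 1 - 1 = kk from by omega, show nn + 2 - 1 = nn + 1 from by omega]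
      rw [ih kk (nn + 2) (by omega) (by omega), ih (kk + 1) (nn + 1) (by omega) (by omega)]
      have hp : (nn + 2 + (kk + 1)).choose (kk + 1 + 1)
          = (nn + 2 + kk).choose (kk + 1) + (nn + 1 + (kk + 1)).choose (kk + 1 + 1) := by
        have h0 := Nat.choose_succ_succ (nn + kk + 2) (kk + 1)
        rw [show nn + 2 + (kk + 1) = nn + kk + 3 from by omega,
            show nn + 2 + kk = nn + kk + 2 from by omega,
            show nn + 1 + (kk + 1) = nn + kk + 2 from by omega]
        simpa using h0
      rw [hp]
      push_cast
      ring

-- dp-table invariant: correct dimensions; every entry is 0 (uncomputed) or the true value.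
def pvInv (K N : Nat) (dp : List (List Int)) : Prop :=
  dp.length = K + 1 ∧ (∀ r ∈ dp, r.length = N + 1) ∧
  ∀ i j : Nat, PySem.List.pyGetD (PySem.List.pyGetD dp (i : Int) []) (j : Int) 0 = 0 ∨
               PySem.List.pyGetD (PySem.List.pyGetD dp (i : Int) []) (j : Int) 0 = pvf i j

theorem pvF_main : ∀ (fuel K N k n : Nat) (dp : List (List Int)),
    k ≤ K → 1 ≤ n → n ≤ N → k + n ≤ fuel → pvInv K N dp →
    (pvF fuel (k : Int) (n : Int) dp).1 = pvf k n ∧ pvInv K N (pvF fuel (k : Int) (n : Int) dp).2 := by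
  intro fuel
  induction fuel with
  | zero => intro K N k n dp _ hn _ hf _; omega
  | succ fuel ih =>
    intro K N k n dp hK hn hN hf hInv
    by_cases hb : k = 0 ∨ n = 1
    · have hcond : (((k : Int) == 0) || ((n : Int) == 1)) = true := by
        rcases hb with h | h <;> subst h <;> simp
      rw [pvF, if_pos hcond]
      refine ⟨?_, hInv⟩
      rw [pvf, if_pos (by omega)]
    · push_neg at hb
      have hk1 : 1 ≤ k := by omega
      have hn2 : 2 ≤ n := by omega
      have hcond : (((k : Int) == 0) || ((n : Int) == 1)) = false := by
        simp; omega
      rw [pvF, if_neg (by simp [hcond])]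
      by_cases hcur : PySem.List.pyGetD (PySem.List.pyGetD dp (k : Int) []) (n : Int) 0 = 0
      · rw [if_pos (by simp only [beq_iff_eq]; exact hcur)]
        rw [show (k : Int) - 1 = ((k - 1 : Nat) : Int) from by omega,
            show (n : Int) - 1 = ((n - 1 : Nat) : Int) from by omega]
        dsimp only
        obtain ⟨h1v, h1i⟩ := ih K N (k - 1) n dp (by omega) hn hN (by omega) hInv
        obtain ⟨h2v, h2i⟩ := ih K N k (n - 1)
          (pvF fuel (((k - 1 : Nat) : Int)) ((n : Int)) dp).2 hK (by omega) (by omega) (by omega) h1i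
        set r1 := pvF fuel (((k - 1 : Nat) : Int)) ((n : Int)) dp with hr1
        set r2 := pvF fuel ((k : Int)) (((n - 1 : Nat) : Int)) r1.2 with hr2
        obtain ⟨hlen, hrows, hent⟩ := h2i
        have hkK : k < r2.2.length := by omega
        have hrowmem : PySem.List.pyGetD r2.2 (k : Int) [] ∈ r2.2 := by
          rw [PySem.List.pyGetD_natCast, List.getD_eq_getElem _ _ hkK]
          exact List.getElem_mem _
        have hnrow : n < (PySem.List.pyGetD r2.2 (k : Int) []).length := by
          rw [hrows _ hrowmem]; omega
        have hv : r1.1 + r2.1 = pvf k n := by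
          have e : pvf k n = pvf (k - 1) n + pvf k (n - 1) := by
            rw [pvf]
            rw [if_neg (by omega)]
          rw [h1v, h2v, e]
        constructor
        · rw [PySem.List.pyGetD_pySetD_natCast _ k k _ [] hkK, if_pos rfl,
              PySem.List.pyGetD_pySetD_natCast _ n n _ 0 hnrow, if_pos rfl, hv]
        · refine ⟨?_, ?_, ?_⟩
          · rw [PySem.List.length_pySetD]; exact hlen
          · intro r hr
            rw [PySem.List.pySetD_natCast] at hr
            rcases List.mem_or_eq_of_mem_set hr with h | h
            · exact hrows r h
            · rw [h, PySem.List.length_pySetD]; exact hrows _ hrowmem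
          · intro i j
            rw [PySem.List.pyGetD_pySetD_natCast _ k i _ [] hkK]
            by_cases hik : i = k
            · rw [if_pos hik, PySem.List.pyGetD_pySetD_natCast _ n j _ 0 hnrow]
              by_cases hjn : j = n
              · rw [if_pos hjn]
                right
                rw [hik, hjn, hv]
              · rw [if_neg hjn, hik]
                exact hent k j
            · rw [if_neg hik]
              exact hent i j
      · rw [if_neg (by simp only [beq_iff_eq]; exact hcur)]
        refine ⟨?_, hInv⟩
        rcases (hInv.2.2 k n) with h | h
        · exact absurd h hcur
        · exact h

-- B's loop invariant: after the range(1, k+2) loop, c = C(n+k, k+1).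
theorem pvB_loop : ∀ (k n : Nat), 1 ≤ n →
    (PySem.List.pyRange 1 ((k : Int) + 2)).foldl
      (fun c i => PySem.Int.floordiv (c * ((n : Int) + i - 1)) i) 1
    = ((n + k).choose (k + 1) : Int) := by
  intro k
  induction k with
  | zero =>
    intro n hn
    rw [show ((0 : Nat) : Int) + 2 = 1 + 1 from by norm_num, PySem.List.pyRange_one_singleton]
    simp only [List.foldl_cons, List.foldl_nil]
    rw [show (1 : Int) * ((n : Int) + 1 - 1) = ((n : Int)) from by ring,
        PySem.Int.floordiv_eq_ediv_of_pos (by norm_num), Int.ediv_one]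
    simp
  | succ k ih =>
    intro n hn
    rw [show ((k + 1 : Nat) : Int) + 2 = ((k : Int) + 2) + 1 from by push_cast; ring,
        PySem.List.pyRange_one_succ_right (by omega), List.foldl_append, ih n hn]
    simp only [List.foldl_cons, List.foldl_nil]
    have e1 : ((n + k).choose (k + 1) : Int) * ((n : Int) + ((k : Int) + 2) - 1)
        = (((n + k).choose (k + 1) * (n + k + 1) : Nat) : Int) := by push_cast; ring
    have e2 : ((k : Int) + 2) = ((k + 2 : Nat) : Int) := by push_cast; ring
    have hid : (n + k).choose (k + 1) * (n + k + 1) = (n + k + 1).choose (k + 2) * (k + 2) := by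
      have h0 := Nat.succ_mul_choose_eq (n + k) (k + 1)
      rw [Nat.mul_comm]
      simpa using h0
    rw [e1, e2, PySem.Int.floordiv_natCast, hid, Nat.mul_div_cancel _ (by omega)]
    norm_cast

-- every entry of the freshly built dp table is 0
theorem pvInv_init (K N : Nat) : pvInv K N (List.replicate (K + 1) (List.replicate (N + 1) (0 : Int))) := by
  have hrep : ∀ (m j : Nat), (List.replicate m (0 : Int)).getD j 0 = 0 := by
    intro m j
    rcases lt_or_ge j m with h | h
    · rw [List.getD_eq_getElem _ _ (by simpa using h)]; simp
    · rw [List.getD_eq_default _ _ (by simpa using h)]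
  refine ⟨by simp, ?_, ?_⟩
  · intro r hr
    rw [List.eq_of_mem_replicate hr]
    simp
  · intro i j
    left
    rw [PySem.List.pyGetD_natCast, PySem.List.pyGetD_natCast]
    rcases lt_or_ge i (K + 1) with h | h
    · have hin : (List.replicate (K + 1) (List.replicate (N + 1) (0 : Int))).getD i []
          = List.replicate (N + 1) (0 : Int) := by
        rw [List.getD_eq_getElem _ _ (by simpa using h), List.getElem_replicate]
      rw [hin]
      exact hrep (N + 1) j
    · have hin : (List.replicate (K + 1) (List.replicate (N + 1) (0 : Int))).getD i []
          = [] := by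
        rw [List.getD_eq_default _ _ (by simpa using h)]
      rw [hin]
      rfl

-- A's value on the main region: C(n+k, k+1)
theorem pv_case_main (K N : Nat) (hN : 1 ≤ N) :
    solution (K : Int) (N : Int) = ((N + K).choose (K + 1) : Int) := by
  unfold solution
  rw [show ((K : Int) + (N : Int)).toNat = K + N from by omega,
      show ((K : Int) + 1).toNat = K + 1 from by omega,
      show ((N : Int) + 1).toNat = N + 1 from by omega]
  obtain ⟨hval, -⟩ := pvF_main (K + N + 1) K N K N _ le_rfl hN le_rfl (by omega) (pvInv_init K N)
  rw [hval, pvf_choose (K + N) K N le_rfl hN]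

theorem solution_spec : Claim_equal_solution := by
  intro k n _ hp
  show solution k n = solution_alt k n
  by_cases hm : 0 ≤ k ∧ 1 ≤ n
  · obtain ⟨K, rfl⟩ : ∃ K : Nat, k = (K : Int) := ⟨k.toNat, by omega⟩
    obtain ⟨N, rfl⟩ : ∃ N : Nat, n = (N : Int) := ⟨n.toNat, by omega⟩
    have hN : 1 ≤ N := by exact_mod_cast hm.2
    rw [pv_case_main K N hN]
    exact (pvB_loop K N hN).symm
  · rcases hp with h | hk0 | hn1
    · exact absurd h hm
    · subst hk0
      have hA : solution 0 n = n := by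
        simp [solution, pvF]
      have hB : solution_alt 0 n = n := by
        unfold solution_alt
        rw [show (0 : Int) + 2 = 1 + 1 from by norm_num, PySem.List.pyRange_one_singleton]
        simp only [List.foldl_cons, List.foldl_nil]
        rw [show (1 : Int) * (n + 1 - 1) = n from by ring,
            PySem.Int.floordiv_eq_ediv_of_pos (by norm_num), Int.ediv_one]
      rw [hA, hB]
    · subst hn1
      have hkneg : k < 0 := by omega
      have hA : solution k 1 = 1 := by
        simp [solution, pvF]
      have hB : solution_alt k 1 = 1 := by
        unfold solution_alt
        rw [show PySem.List.pyRange 1 (k + 2) = [] from by simp [PySem.List.pyRange]; omega]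
        rfl
      rw [hA, hB]
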